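-- pv_equiv track=rewrite | github.com/Cross-Lingual-NER/Projection-Data-Transfer-Cross-Lingual-NER | src/pipelines/align/matching.py | generate_entity_candidates_from_alignments
-- ===== SOURCE A (Python) =====
-- def generate_entity_candidates_from_alignments(
--     start_idx: int, end_idx: int, alignments_by_trans_words: list[list[int]]
-- ) -> list[tuple[int, int]]:
--     """Returns entity candidates in the target sentence. As entity candidate we
--     consider any continious range of target words which are aligned to any word
--     in the source sentence"""
--     candidates = []
--     for idx in range(start_idx, end_idx):
--         # idxs of all correspondence in original words
--         orig_corrs = alignments_by_trans_words[idx]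
--
--         for corr_idx in orig_corrs:
--             new_candidate = True
--             for candidate in candidates:
--                 if candidate[0] <= corr_idx < candidate[1]:  # inside candidate
--                     new_candidate = False
--                 elif corr_idx == candidate[1]:  # candidate + 1 word right
--                     candidate[1] += 1
--                     new_candidate = False
--                 elif corr_idx == candidate[0] - 1:  # 1 word left + candidate
--                     candidate[0] -= 1
--                     new_candidate = False
--             if new_candidate:
--                 candidates.append([corr_idx, corr_idx + 1])
--     return candidates
-- ===== SOURCE B (Python) =====
-- def generate_entity_candidates_from_alignments(
--     start_idx: int, end_idx: int, alignments_by_trans_words: list[list[int]]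
-- ) -> list[tuple[int, int]]:
--     """Same result as A, computed without A's inner scan over all candidates:
--     candidates are indexed by their current end value (ends) and start value
--     (starts), with a point-coverage counter (cov), so each aligned index is
--     handled by direct lookup of the affected candidates."""
--     candidates = []  # list of [s, e]; position in the list = candidate id
--     ends = {}        # end value e -> list of candidate ids whose interval ends at e
--     starts = {}      # start value s -> list of candidate ids whose interval starts at s
--     cov = {}         # point x -> number of candidates with s <= x < e
--     for idx in range(start_idx, end_idx):
--         for c in alignments_by_trans_words[idx]:
--             ids_e = ends.pop(c, [])        # candidates extendable to the right
--             ids_s = starts.pop(c + 1, [])  # candidates extendable to the left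
--             covered = cov.get(c, 0) > 0
--             for i in ids_e:
--                 candidates[i][1] = c + 1
--                 ends.setdefault(c + 1, []).append(i)
--                 cov[c] = cov.get(c, 0) + 1
--             for i in ids_s:
--                 candidates[i][0] = c
--                 starts.setdefault(c, []).append(i)
--                 cov[c] = cov.get(c, 0) + 1
--             if not (covered or ids_e or ids_s):
--                 i = len(candidates)
--                 candidates.append([c, c + 1])
--                 ends.setdefault(c + 1, []).append(i)
--                 starts.setdefault(c, []).append(i)
--                 cov[c] = cov.get(c, 0) + 1
--     return candidates
-- ===== Notes on version B (the rewrite author's own statement) =====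
-- stated objective: alternative
-- what changed: A rescans the whole candidate list for every aligned source index; B instead indexes candidates by their current end value and start value in dicts plus a point-coverage counter, processing each aligned index by direct lookup of the affected candidates (it trades A's inner scan for dict bookkeeping; not measurably faster on the benchmark's input family).
import Mathlib
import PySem

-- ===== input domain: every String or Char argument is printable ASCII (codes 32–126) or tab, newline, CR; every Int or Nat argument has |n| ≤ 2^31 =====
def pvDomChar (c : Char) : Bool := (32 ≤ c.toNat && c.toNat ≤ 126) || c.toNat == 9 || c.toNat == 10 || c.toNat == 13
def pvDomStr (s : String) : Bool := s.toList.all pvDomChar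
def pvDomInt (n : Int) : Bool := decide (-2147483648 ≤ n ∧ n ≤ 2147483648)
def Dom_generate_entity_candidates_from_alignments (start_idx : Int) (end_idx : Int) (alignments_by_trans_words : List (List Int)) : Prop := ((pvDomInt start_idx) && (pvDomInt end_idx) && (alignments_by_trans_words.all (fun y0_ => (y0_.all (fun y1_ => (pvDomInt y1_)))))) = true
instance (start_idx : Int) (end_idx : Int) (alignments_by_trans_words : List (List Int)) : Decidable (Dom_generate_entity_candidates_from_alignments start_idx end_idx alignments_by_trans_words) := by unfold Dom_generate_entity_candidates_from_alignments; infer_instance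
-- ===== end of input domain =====

-- B replaces A's inner scan over all candidates by dict indexes on the candidates' current
-- start/end values plus a point-coverage counter, so each aligned index is handled by direct
-- lookups of the affected candidates; objective: alternative algorithm of similar measured cost.

-- ===== PORT A =====
-- inner 'for candidate in candidates' loop body: candidates are rebuilt left-to-right,
-- the Bool is Python's new_candidate flag
def pvStepCandA (c : Int) (acc : List (List Int) × Bool) (cand : List Int) : List (List Int) × Bool :=
  match cand with
  | [s, e] =>
    if s ≤ c ∧ c < e then (acc.1 ++ [[s, e]], false)
    else if c = e then (acc.1 ++ [[s, e + 1]], false)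
    else if c = s - 1 then (acc.1 ++ [[s - 1, e]], false)
    else (acc.1 ++ [[s, e]], acc.2)
  | cand => (acc.1 ++ [cand], acc.2)  -- unreachable: every candidate is a 2-element list

-- body of 'for corr_idx in orig_corrs'
def pvStepA (cands : List (List Int)) (c : Int) : List (List Int) :=
  let r := cands.foldl (pvStepCandA c) ([], true)
  if r.2 then r.1 ++ [[c, c + 1]] else r.1

def generate_entity_candidates_from_alignments (start_idx : Int) (end_idx : Int) (alignments_by_trans_words : List (List Int)) : List (List Int) :=
  (PySem.List.pyRange start_idx end_idx 1).foldl
    (fun cands idx =>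
      match PySem.List.pyGet? alignments_by_trans_words idx with
      | some orig_corrs => orig_corrs.foldl pvStepA cands
      | none => cands)  -- IndexError in Python; such inputs are excluded by Pre_
    []

-- ===== PORT B =====
-- state: (candidates, ends, starts, cov) exactly as in Source B; candidate ids are positions
-- body of 'for i in ids_e': candidates[i][1] = c+1; ends.setdefault(c+1,[]).append(i); cov[c] += 1
def pvEStep (c : Int) (acc : List (List Int) × PySem.Dict Int (List Nat) × PySem.Dict Int Int) (i : Nat) :
    List (List Int) × PySem.Dict Int (List Nat) × PySem.Dict Int Int :=
  ((match acc.1[i]? with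
    | some [s, _] => acc.1.set i [s, c + 1]
    | _ => acc.1),                            -- fallback unreachable: every candidate is a 2-list
   acc.2.1.insert (c + 1) (acc.2.1.getD (c + 1) [] ++ [i]),
   acc.2.2.insert c (acc.2.2.getD c 0 + 1))

-- body of 'for i in ids_s': candidates[i][0] = c; starts.setdefault(c,[]).append(i); cov[c] += 1
def pvSStep (c : Int) (acc : List (List Int) × PySem.Dict Int (List Nat) × PySem.Dict Int Int) (i : Nat) :
    List (List Int) × PySem.Dict Int (List Nat) × PySem.Dict Int Int :=
  ((match acc.1[i]? with
    | some [_, e] => acc.1.set i [c, e]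
    | _ => acc.1),
   acc.2.1.insert c (acc.2.1.getD c [] ++ [i]),
   acc.2.2.insert c (acc.2.2.getD c 0 + 1))

-- body of 'for c in alignments_by_trans_words[idx]'
def pvStepB (st : List (List Int) × PySem.Dict Int (List Nat) × PySem.Dict Int (List Nat) × PySem.Dict Int Int) (c : Int) :
    List (List Int) × PySem.Dict Int (List Nat) × PySem.Dict Int (List Nat) × PySem.Dict Int Int :=
  let ids_e := st.2.1.getD c []                 -- ends.pop(c, [])
  let ids_s := st.2.2.1.getD (c + 1) []         -- starts.pop(c + 1, [])
  let covered : Bool := decide (0 < st.2.2.2.getD c 0)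
  let r1 := ids_e.foldl (pvEStep c) (st.1, st.2.1.erase c, st.2.2.2)
  let r2 := ids_s.foldl (pvSStep c) (r1.1, st.2.2.1.erase (c + 1), r1.2.2)
  if covered = false ∧ ids_e = [] ∧ ids_s = [] then
    let n := r2.1.length
    (r2.1 ++ [[c, c + 1]],
     r1.2.1.insert (c + 1) (r1.2.1.getD (c + 1) [] ++ [n]),
     r2.2.1.insert c (r2.2.1.getD c [] ++ [n]),
     r2.2.2.insert c (r2.2.2.getD c 0 + 1))
  else (r2.1, r1.2.1, r2.2.1, r2.2.2)

def generate_entity_candidates_from_alignments_alt (start_idx : Int) (end_idx : Int) (alignments_by_trans_words : List (List Int)) : List (List Int) :=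
  ((PySem.List.pyRange start_idx end_idx 1).foldl
    (fun st idx =>
      match PySem.List.pyGet? alignments_by_trans_words idx with
      | some orig_corrs => orig_corrs.foldl pvStepB st
      | none => st)
    ([], PySem.Dict.empty, PySem.Dict.empty, PySem.Dict.empty)).1

-- ===== PRECONDITION & SPEC =====
-- Pre_ excludes exactly the inputs where Python A raises IndexError: a nonempty scanned
-- range must lie within Python's (negative indices included) bounds of the outer list.
def Pre_generate_entity_candidates_from_alignments (start_idx : Int) (end_idx : Int) (alignments_by_trans_words : List (List Int)) : Prop :=
  start_idx < end_idx → (-(alignments_by_trans_words.length : Int) ≤ start_idx ∧ end_idx ≤ (alignments_by_trans_words.length : Int))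
instance (start_idx : Int) (end_idx : Int) (alignments_by_trans_words : List (List Int)) : Decidable (Pre_generate_entity_candidates_from_alignments start_idx end_idx alignments_by_trans_words) := by unfold Pre_generate_entity_candidates_from_alignments; infer_instance
def pvWitness_generate_entity_candidates_from_alignments : Int × Int × List (List Int) := (0, 2, [[0, 1], [3]])

def Spec_generate_entity_candidates_from_alignments (start_idx : Int) (end_idx : Int) (alignments_by_trans_words : List (List Int)) (out : List (List Int)) : Prop := out = generate_entity_candidates_from_alignments_alt start_idx end_idx alignments_by_trans_words
instance (start_idx : Int) (end_idx : Int) (alignments_by_trans_words : List (List Int)) (out : List (List Int)) : Decidable (Spec_generate_entity_candidates_from_alignments start_idx end_idx alignments_by_trans_words out) := by unfold Spec_generate_entity_candidates_from_alignments; infer_instance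

-- ===== CLAIM (what is proved, stated in full; the proofs are below) =====
def Claim_equal_generate_entity_candidates_from_alignments : Prop := ∀ (start_idx : Int) (end_idx : Int) (alignments_by_trans_words : List (List Int)), Dom_generate_entity_candidates_from_alignments start_idx end_idx alignments_by_trans_words → Pre_generate_entity_candidates_from_alignments start_idx end_idx alignments_by_trans_words → Spec_generate_entity_candidates_from_alignments start_idx end_idx alignments_by_trans_words (generate_entity_candidates_from_alignments start_idx end_idx alignments_by_trans_words)

-- ===== LEMMAS AND PROOFS =====

-- the per-candidate transformation A applies for one aligned index c
def pvG (c : Int) (x : List Int) : List Int :=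
  match x with
  | [s, e] => if s ≤ c ∧ c < e then [s, e] else if c = e then [s, e + 1] else if c = s - 1 then [s - 1, e] else [s, e]
  | x => x

-- whether a candidate matches one of A's three conditions for c
def pvMatch (c : Int) (x : List Int) : Bool :=
  match x with
  | [s, e] => decide ((s ≤ c ∧ c < e) ∨ c = e ∨ c = s - 1)
  | _ => false

def pvUpdE (c : Int) (x : List Int) : List Int :=
  match x with
  | [s, _] => [s, c + 1]
  | x => x

def pvUpdS (c : Int) (x : List Int) : List Int :=
  match x with
  | [_, e] => [c, e]
  | x => x

-- state invariant tying B's dicts to the candidate list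
def pvInv (cs : List (List Int)) (ends starts : PySem.Dict Int (List Nat)) (cov : PySem.Dict Int Int) : Prop :=
  (∀ x ∈ cs, ∃ s e : Int, x = [s, e] ∧ s < e) ∧
  (∀ v : Int, (ends.getD v []).Nodup ∧ ∀ i : Nat, i ∈ ends.getD v [] ↔ ∃ s : Int, cs[i]? = some [s, v]) ∧
  (∀ u : Int, (starts.getD u []).Nodup ∧ ∀ i : Nat, i ∈ starts.getD u [] ↔ ∃ e : Int, cs[i]? = some [u, e]) ∧
  (∀ x : Int, 0 ≤ cov.getD x 0 ∧ (0 < cov.getD x 0 ↔ ∃ (i : Nat) (s e : Int), cs[i]? = some [s, e] ∧ s ≤ x ∧ x < e))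

lemma pv_get?_erase {κ ν : Type} [DecidableEq κ] [BEq κ] [LawfulBEq κ] (d : PySem.Dict κ ν) (k k' : κ) :
    (d.erase k).get? k' = if k' = k then none else d.get? k' := by
  obtain ⟨items⟩ := d
  induction items with
  | nil => simp [PySem.Dict.erase, PySem.Dict.get?]
  | cons p rest ih =>
    simp only [PySem.Dict.erase, PySem.Dict.get?, List.filter_cons] at *
    by_cases hpk : p.1 = k
    · rw [if_neg (by simp [hpk])]
      rcases eq_or_ne k' k with h | h
      · simpa [h] using ih
      · rw [if_neg h] at ih ⊢
        have hb : (p.1 == k') = false := by simp [hpk, Ne.symm h]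
        simp only [List.find?_cons, hb]
        exact ih
    · rw [if_pos (by simp [hpk])]
      by_cases hpk' : p.1 = k'
      · have hk'k : k' ≠ k := fun h => hpk (hpk'.trans h)
        have hb : (p.1 == k') = true := by simp [hpk']
        simp only [List.find?_cons, hb, if_neg hk'k]
      · have hb : (p.1 == k') = false := by simp [hpk']
        simp only [List.find?_cons, hb]
        rcases eq_or_ne k' k with h | h
        · simpa [h] using ih
        · rw [if_neg h] at ih ⊢; exact ih

lemma pv_getD_erase {κ ν : Type} [DecidableEq κ] [BEq κ] [LawfulBEq κ] (d : PySem.Dict κ ν) (k k' : κ) (dflt : ν) :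
    (d.erase k).getD k' dflt = if k' = k then dflt else d.getD k' dflt := by
  simp [PySem.Dict.getD_eq_get?_getD, pv_get?_erase]
  split <;> simp [PySem.Dict.getD_eq_get?_getD]

-- A's inner loop as map + any
lemma pv_foldA (c : Int) (cs : List (List Int)) : ∀ (acc : List (List Int)) (b : Bool),
    cs.foldl (pvStepCandA c) (acc, b) = (acc ++ cs.map (pvG c), b && !(cs.any (pvMatch c))) := by
  induction cs with
  | nil => intro acc b; simp
  | cons x tl ih =>
    intro acc b
    have hstep : pvStepCandA c (acc, b) x = (acc ++ [pvG c x], b && !(pvMatch c x)) := by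
      rcases x with _ | ⟨s, _ | ⟨e, _ | ⟨y, t⟩⟩⟩ <;>
        simp only [pvStepCandA, pvG, pvMatch] <;>
        try split_ifs with h1 h2 h3
      all_goals simp_all
      intro _
      by_cases hsc : s ≤ c
      · exact Or.inr (h1 hsc)
      · exact Or.inl (by omega)
    rw [List.foldl_cons, hstep, ih]
    simp [Bool.and_assoc]

lemma pv_stepA_eq (cs : List (List Int)) (c : Int) :
    pvStepA cs c = if cs.any (pvMatch c) then cs.map (pvG c) else cs.map (pvG c) ++ [[c, c + 1]] := by
  simp only [pvStepA, pv_foldA c cs [] true]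
  cases h : cs.any (pvMatch c) <;> simp [h]

-- the combined ids_e fold, characterised componentwise
lemma pv_foldE (c : Int) (ids : List Nat) : ids.Nodup →
    ∀ (cands : List (List Int)) (ends : PySem.Dict Int (List Nat)) (cov : PySem.Dict Int Int),
    (∀ i ∈ ids, ∃ s e : Int, cands[i]? = some [s, e]) →
    (∀ j : Nat, (ids.foldl (pvEStep c) (cands, ends, cov)).1[j]?
        = if j ∈ ids then (cands[j]?).map (pvUpdE c) else cands[j]?) ∧
    (∀ v : Int, (ids.foldl (pvEStep c) (cands, ends, cov)).2.1.getD v []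
        = if v = c + 1 then ends.getD (c + 1) [] ++ ids else ends.getD v []) ∧
    (∀ x : Int, (ids.foldl (pvEStep c) (cands, ends, cov)).2.2.getD x 0
        = if x = c then cov.getD c 0 + (ids.length : Int) else cov.getD x 0) := by
  induction ids with
  | nil =>
    intro _ cands ends cov _
    refine ⟨fun j => by simp, fun v => ?_, fun x => ?_⟩ <;> (split <;> simp_all)
  | cons i tl ih =>
    intro hnd cands ends cov hshape
    obtain ⟨hi_tl, hnd_tl⟩ := List.nodup_cons.mp hnd
    obtain ⟨s, e, hse⟩ := hshape i (by simp)
    obtain ⟨hilen, -⟩ := List.getElem?_eq_some_iff.mp hse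
    have hstep : pvEStep c (cands, ends, cov) i
        = (cands.set i [s, c + 1], ends.insert (c + 1) (ends.getD (c + 1) [] ++ [i]),
           cov.insert c (cov.getD c 0 + 1)) := by
      simp [pvEStep, hse]
    have hshape' : ∀ j ∈ tl, ∃ s' e' : Int, (cands.set i [s, c + 1])[j]? = some [s', e'] := by
      intro j hj
      rw [List.getElem?_set_ne (fun h => hi_tl (by rw [h]; exact hj))]
      exact hshape j (List.mem_cons_of_mem _ hj)
    obtain ⟨IH1, IH2, IH3⟩ := ih hnd_tl (cands.set i [s, c + 1]) _ _ hshape'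
    refine ⟨fun j => ?_, fun v => ?_, fun x => ?_⟩
    · rw [List.foldl_cons, hstep, IH1 j]
      rcases eq_or_ne j i with rfl | hji
      · rw [if_neg hi_tl, if_pos (by simp), List.getElem?_set_self hilen, hse]
        rfl
      · rw [List.getElem?_set_ne (Ne.symm hji)]
        by_cases hjtl : j ∈ tl
        · rw [if_pos hjtl, if_pos (by simp [hjtl])]
        · rw [if_neg hjtl, if_neg (by simp [hjtl, hji])]
    · rw [List.foldl_cons, hstep, IH2 v]
      simp only [PySem.Dict.getD_insert]
      rcases eq_or_ne v (c + 1) with rfl | hv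
      · simp
      · simp [hv]
    · rw [List.foldl_cons, hstep, IH3 x]
      simp only [PySem.Dict.getD_insert]
      rcases eq_or_ne x c with rfl | hx
      · simp only [if_pos rfl, List.length_cons]
        push_cast; ring
      · simp [hx]

lemma pv_foldS (c : Int) (ids : List Nat) : ids.Nodup →
    ∀ (cands : List (List Int)) (starts : PySem.Dict Int (List Nat)) (cov : PySem.Dict Int Int),
    (∀ i ∈ ids, ∃ s e : Int, cands[i]? = some [s, e]) →
    (∀ j : Nat, (ids.foldl (pvSStep c) (cands, starts, cov)).1[j]?
        = if j ∈ ids then (cands[j]?).map (pvUpdS c) else cands[j]?) ∧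
    (∀ u : Int, (ids.foldl (pvSStep c) (cands, starts, cov)).2.1.getD u []
        = if u = c then starts.getD c [] ++ ids else starts.getD u []) ∧
    (∀ x : Int, (ids.foldl (pvSStep c) (cands, starts, cov)).2.2.getD x 0
        = if x = c then cov.getD c 0 + (ids.length : Int) else cov.getD x 0) := by
  induction ids with
  | nil =>
    intro _ cands starts cov _
    refine ⟨fun j => by simp, fun v => ?_, fun x => ?_⟩ <;> (split <;> simp_all)
  | cons i tl ih =>
    intro hnd cands starts cov hshape
    obtain ⟨hi_tl, hnd_tl⟩ := List.nodup_cons.mp hnd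
    obtain ⟨s, e, hse⟩ := hshape i (by simp)
    obtain ⟨hilen, -⟩ := List.getElem?_eq_some_iff.mp hse
    have hstep : pvSStep c (cands, starts, cov) i
        = (cands.set i [c, e], starts.insert c (starts.getD c [] ++ [i]),
           cov.insert c (cov.getD c 0 + 1)) := by
      simp [pvSStep, hse]
    have hshape' : ∀ j ∈ tl, ∃ s' e' : Int, (cands.set i [c, e])[j]? = some [s', e'] := by
      intro j hj
      rw [List.getElem?_set_ne (fun h => hi_tl (by rw [h]; exact hj))]
      exact hshape j (List.mem_cons_of_mem _ hj)
    obtain ⟨IH1, IH2, IH3⟩ := ih hnd_tl (cands.set i [c, e]) _ _ hshape'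
    refine ⟨fun j => ?_, fun u => ?_, fun x => ?_⟩
    · rw [List.foldl_cons, hstep, IH1 j]
      rcases eq_or_ne j i with rfl | hji
      · rw [if_neg hi_tl, if_pos (by simp), List.getElem?_set_self hilen, hse]
        rfl
      · rw [List.getElem?_set_ne (Ne.symm hji)]
        by_cases hjtl : j ∈ tl
        · rw [if_pos hjtl, if_pos (by simp [hjtl])]
        · rw [if_neg hjtl, if_neg (by simp [hjtl, hji])]
    · rw [List.foldl_cons, hstep, IH2 u]
      simp only [PySem.Dict.getD_insert]
      rcases eq_or_ne u c with rfl | hu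
      · simp
      · simp [hu]
    · rw [List.foldl_cons, hstep, IH3 x]
      simp only [PySem.Dict.getD_insert]
      rcases eq_or_ne x c with rfl | hx
      · simp only [if_pos rfl, List.length_cons]
        push_cast; ring
      · simp [hx]

-- arithmetic characterisation of pvG on a well-formed candidate
lemma pv_G_char (c s e : Int) (h : s < e) :
    pvG c [s, e] = if e = c then [s, c + 1] else if s = c + 1 then [c, e] else [s, e] := by
  show (if s ≤ c ∧ c < e then ([s, e] : List Int)
      else if c = e then [s, e + 1] else if c = s - 1 then [s - 1, e] else [s, e]) = _
  by_cases h1 : s ≤ c ∧ c < e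
  · rw [if_pos h1, if_neg (show ¬ e = c by omega), if_neg (show ¬ s = c + 1 by omega)]
  · by_cases h2 : c = e
    · rw [if_neg h1, if_pos h2, if_pos (show e = c by omega)]
      simp [h2]
    · by_cases h3 : c = s - 1
      · rw [if_neg h1, if_neg h2, if_pos h3, if_neg (show ¬ e = c by omega),
          if_pos (show s = c + 1 by omega)]
        have hsc : s - 1 = c := by omega
        rw [hsc]
      · rw [if_neg h1, if_neg h2, if_neg h3, if_neg (show ¬ e = c by omega),
          if_neg (show ¬ s = c + 1 by omega)]

lemma pv_match_char (c s e : Int) :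
    pvMatch c [s, e] = true ↔ ((s ≤ c ∧ c < e) ∨ c = e ∨ c = s - 1) := by
  simp [pvMatch]

-- one aligned index: B's dict step produces exactly A's scan step and preserves the invariant
lemma pv_stepB_spec (c : Int) (cs : List (List Int)) (ends starts : PySem.Dict Int (List Nat)) (cov : PySem.Dict Int Int)
    (h : pvInv cs ends starts cov) :
    ∃ e' s' v', pvStepB (cs, ends, starts, cov) c = (pvStepA cs c, e', s', v') ∧ pvInv (pvStepA cs c) e' s' v' := by
  obtain ⟨h1, h2, h3, h4⟩ := h
  have hget : ∀ {i : Nat} {x : List Int}, cs[i]? = some x → ∃ s e : Int, x = [s, e] ∧ s < e :=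
    fun hi => h1 _ (List.mem_of_getElem? hi)
  have hnd_e := (h2 c).1
  have iff_e := (h2 c).2
  have hnd_s := (h3 (c + 1)).1
  have iff_s := (h3 (c + 1)).2
  have hdisj : ∀ i : Nat, i ∈ ends.getD c [] → i ∈ starts.getD (c + 1) [] → False := by
    intro i hie his
    obtain ⟨s, hsc⟩ := (iff_e i).mp hie
    obtain ⟨e, hce⟩ := (iff_s i).mp his
    obtain ⟨s', e', hx, hlt⟩ := hget hsc
    rw [hsc] at hce
    simp only [Option.some.injEq, List.cons.injEq, and_true] at hce hx
    obtain ⟨he1, he2⟩ := hce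
    obtain ⟨hx1, hx2⟩ := hx
    omega
  have shape_e : ∀ i ∈ ends.getD c [], ∃ s e : Int, cs[i]? = some [s, e] := by
    intro i hi
    obtain ⟨s, hs⟩ := (iff_e i).mp hi
    exact ⟨s, c, hs⟩
  obtain ⟨E1, E2, E3⟩ := pv_foldE c (ends.getD c []) hnd_e cs (ends.erase c) cov shape_e
  set r1 := (ends.getD c []).foldl (pvEStep c) (cs, ends.erase c, cov) with hr1
  have shape_s : ∀ i ∈ starts.getD (c + 1) [], ∃ s e : Int, r1.1[i]? = some [s, e] := by
    intro i hi
    obtain ⟨e, hs⟩ := (iff_s i).mp hi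
    rw [E1 i, if_neg (fun hie => hdisj i hie hi), hs]
    exact ⟨c + 1, e, rfl⟩
  obtain ⟨S1, S2, S3⟩ := pv_foldS c (starts.getD (c + 1) []) hnd_s r1.1 (starts.erase (c + 1)) r1.2.2 shape_s
  set r2 := (starts.getD (c + 1) []).foldl (pvSStep c) (r1.1, starts.erase (c + 1), r1.2.2) with hr2
  -- combined candidate characterisation
  have hc2 : ∀ j : Nat, r2.1[j]? =
      if j ∈ ends.getD c [] then (cs[j]?).map (pvUpdE c)
      else if j ∈ starts.getD (c + 1) [] then (cs[j]?).map (pvUpdS c)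
      else cs[j]? := by
    intro j
    rw [S1 j]
    by_cases hjs : j ∈ starts.getD (c + 1) []
    · rw [if_pos hjs, E1 j, if_neg (fun hje => hdisj j hje hjs), if_neg (fun hje => hdisj j hje hjs), if_pos hjs]
    · rw [if_neg hjs, E1 j]
      by_cases hje : j ∈ ends.getD c []
      · rw [if_pos hje, if_pos hje]
      · rw [if_neg hje, if_neg hje, if_neg hjs]
  -- A's flag condition, in terms of B's indexes
  have hany : cs.any (pvMatch c) = true ↔
      (0 < cov.getD c 0 ∨ ends.getD c [] ≠ [] ∨ starts.getD (c + 1) [] ≠ []) := by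
    rw [List.any_eq_true]
    constructor
    · rintro ⟨x, hx, hm⟩
      obtain ⟨s, e, rfl, hlt⟩ := h1 x hx
      obtain ⟨i, hi⟩ := List.getElem?_of_mem hx
      rw [pv_match_char] at hm
      rcases hm with hin | heq | heq
      · exact Or.inl (((h4 c).2).mpr ⟨i, s, e, hi, hin.1, hin.2⟩)
      · refine Or.inr (Or.inl (List.ne_nil_of_mem ((iff_e i).mpr ⟨s, ?_⟩)))
        rw [hi, heq]
      · refine Or.inr (Or.inr (List.ne_nil_of_mem ((iff_s i).mpr ⟨e, ?_⟩)))
        rw [hi]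
        have : s = c + 1 := by omega
        rw [this]
    · rintro (hcov | hne | hns)
      · obtain ⟨i, s, e, hi, hse⟩ := ((h4 c).2).mp hcov
        exact ⟨[s, e], List.mem_of_getElem? hi, (pv_match_char c s e).mpr (Or.inl hse)⟩
      · obtain ⟨i, hi⟩ := List.exists_mem_of_ne_nil _ hne
        obtain ⟨s, hs⟩ := (iff_e i).mp hi
        exact ⟨[s, c], List.mem_of_getElem? hs, (pv_match_char c s c).mpr (Or.inr (Or.inl rfl))⟩
      · obtain ⟨i, hi⟩ := List.exists_mem_of_ne_nil _ hns
        obtain ⟨e, hs⟩ := (iff_s i).mp hi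
        exact ⟨[c + 1, e], List.mem_of_getElem? hs, (pv_match_char c (c + 1) e).mpr (Or.inr (Or.inr (by omega)))⟩
  have hB : pvStepB (cs, ends, starts, cov) c =
      if decide (0 < cov.getD c 0) = false ∧ ends.getD c [] = [] ∧ starts.getD (c + 1) [] = [] then
        (r2.1 ++ [[c, c + 1]],
         r1.2.1.insert (c + 1) (r1.2.1.getD (c + 1) [] ++ [r2.1.length]),
         r2.2.1.insert c (r2.2.1.getD c [] ++ [r2.1.length]),
         r2.2.2.insert c (r2.2.2.getD c 0 + 1))
      else (r2.1, r1.2.1, r2.2.1, r2.2.2) := by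
    rw [hr1, hr2]
    rfl
  by_cases hAny : cs.any (pvMatch c) = true
  · -- some candidate matched: B takes the else branch, A extends in place
    have hcond : ¬(decide (0 < cov.getD c 0) = false ∧ ends.getD c [] = [] ∧ starts.getD (c + 1) [] = []) := by
      rintro ⟨hcv, hne, hns⟩
      rcases hany.mp hAny with hx | hx | hx
      · simp at hcv; omega
      · exact hx hne
      · exact hx hns
    have hcs' : pvStepA cs c = cs.map (pvG c) := by
      rw [pv_stepA_eq, if_pos hAny]
    have hmap : r2.1 = cs.map (pvG c) := by
      apply List.ext_getElem?
      intro j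
      rw [hc2 j, List.getElem?_map]
      by_cases hje : j ∈ ends.getD c []
      · rw [if_pos hje]
        obtain ⟨s, hs⟩ := (iff_e j).mp hje
        obtain ⟨s', e', hx, hlt⟩ := hget hs
        simp only [List.cons.injEq, and_true] at hx
        rw [hs]
        simp only [Option.map_some]
        rw [pv_G_char c s c (by omega)]
        simp [pvUpdE]
      · rw [if_neg hje]
        by_cases hjs : j ∈ starts.getD (c + 1) []
        · rw [if_pos hjs]
          obtain ⟨e, hs⟩ := (iff_s j).mp hjs
          obtain ⟨s', e', hx, hlt⟩ := hget hs
          simp only [List.cons.injEq, and_true] at hx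
          rw [hs]
          simp only [Option.map_some]
          rw [pv_G_char c (c + 1) e (by omega)]
          have hec : ¬(e = c) := by omega
          simp [pvUpdS, hec]
        · rw [if_neg hjs]
          cases hcs : cs[j]? with
          | none => simp
          | some x =>
            obtain ⟨s, e, rfl, hlt⟩ := hget hcs
            have hec : e ≠ c := fun hh => hje ((iff_e j).mpr ⟨s, by rw [hcs, hh]⟩)
            have hsc : s ≠ c + 1 := fun hh => hjs ((iff_s j).mpr ⟨e, by rw [hcs, hh]⟩)
            simp only [Option.map_some]
            rw [pv_G_char c s e hlt, if_neg hec, if_neg hsc]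
    -- dict characterisations after the two folds
    have Ev : ∀ v : Int, r1.2.1.getD v [] =
        if v = c then [] else if v = c + 1 then ends.getD (c + 1) [] ++ ends.getD c [] else ends.getD v [] := by
      intro v
      rw [E2 v]
      rcases eq_or_ne c v with rfl | hvc
      · rw [if_neg (by omega), if_pos rfl, pv_getD_erase, if_pos rfl]
      · rw [if_neg (Ne.symm hvc)]
        rcases eq_or_ne (c + 1) v with rfl | hv1
        · rw [if_pos rfl, if_pos rfl, pv_getD_erase, if_neg (by omega)]
        · rw [if_neg (Ne.symm hv1), if_neg (Ne.symm hv1), pv_getD_erase, if_neg (Ne.symm hvc)]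
    have Sv : ∀ u : Int, r2.2.1.getD u [] =
        if u = c + 1 then [] else if u = c then starts.getD c [] ++ starts.getD (c + 1) [] else starts.getD u [] := by
      intro u
      rw [S2 u]
      rcases eq_or_ne (c + 1) u with rfl | hu1
      · rw [if_neg (by omega), if_pos rfl, pv_getD_erase, if_pos rfl]
      · rw [if_neg (Ne.symm hu1)]
        rcases eq_or_ne c u with rfl | huc
        · rw [if_pos rfl, if_pos rfl, pv_getD_erase, if_neg (by omega)]
        · rw [if_neg (Ne.symm huc), if_neg (Ne.symm huc), pv_getD_erase, if_neg (Ne.symm hu1)]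
    have Cv : ∀ x : Int, r2.2.2.getD x 0 =
        if x = c then cov.getD c 0 + ((ends.getD c []).length : Int) + ((starts.getD (c + 1) []).length : Int)
        else cov.getD x 0 := by
      intro x
      rw [S3 x]
      rcases eq_or_ne c x with rfl | hxc
      · rw [if_pos rfl, if_pos rfl, E3 c, if_pos rfl]
      · rw [if_neg (Ne.symm hxc), if_neg (Ne.symm hxc), E3 x, if_neg (Ne.symm hxc)]
    refine ⟨r1.2.1, r2.2.1, r2.2.2, ?_, ?_⟩
    · rw [hB, if_neg hcond, hmap, hcs']
    rw [hcs']
    have hmapget : ∀ j : Nat, (cs.map (pvG c))[j]? = (cs[j]?).map (pvG c) := fun j => List.getElem?_map ..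
    refine ⟨?_, ?_, ?_, ?_⟩
    · -- shapes
      intro x hx
      rw [List.mem_map] at hx
      obtain ⟨y, hy, rfl⟩ := hx
      obtain ⟨s, e, rfl, hlt⟩ := h1 y hy
      rw [pv_G_char c s e hlt]
      split_ifs with he hs
      · exact ⟨s, c + 1, rfl, by omega⟩
      · exact ⟨c, e, rfl, by omega⟩
      · exact ⟨s, e, rfl, hlt⟩
    · -- ends invariant
      intro v
      rw [Ev v]
      rcases eq_or_ne c v with rfl | hvc
      · rw [if_pos rfl]
        refine ⟨List.nodup_nil, fun i => ?_⟩
        rw [hmapget i]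
        cases hcs : cs[i]? with
        | none => simp
        | some x =>
          obtain ⟨s, e, rfl, hlt⟩ := hget hcs
          simp only [Option.map_some]
          rw [pv_G_char c s e hlt]
          split_ifs with hh1 hh2 <;> simp <;> omega
      · rcases eq_or_ne (c + 1) v with rfl | hv1
        · rw [if_neg (Ne.symm hvc), if_pos rfl]
          refine ⟨?_, fun i => ?_⟩
          · refine List.Nodup.append (h2 (c + 1)).1 hnd_e ?_
            intro i hi1 hi2
            obtain ⟨s, hs⟩ := ((h2 (c + 1)).2 i).mp hi1
            obtain ⟨s', hs'⟩ := (iff_e i).mp hi2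
            rw [hs] at hs'
            simp at hs'
          · rw [List.mem_append, (h2 (c + 1)).2 i, iff_e i, hmapget i]
            cases hcs : cs[i]? with
            | none => simp
            | some x =>
              obtain ⟨s, e, rfl, hlt⟩ := hget hcs
              simp only [Option.map_some]
              rw [pv_G_char c s e hlt]
              split_ifs with hh1 hh2 <;> simp <;> omega
        · rw [if_neg (Ne.symm hvc), if_neg (Ne.symm hv1)]
          refine ⟨(h2 v).1, fun i => ?_⟩
          rw [(h2 v).2 i, hmapget i]
          cases hcs : cs[i]? with
          | none => simp
          | some x =>
            obtain ⟨s, e, rfl, hlt⟩ := hget hcs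
            simp only [Option.map_some]
            rw [pv_G_char c s e hlt]
            split_ifs with hh1 hh2 <;> simp <;> omega
    · -- starts invariant
      intro u
      rw [Sv u]
      rcases eq_or_ne (c + 1) u with rfl | hu1
      · rw [if_pos rfl]
        refine ⟨List.nodup_nil, fun i => ?_⟩
        rw [hmapget i]
        cases hcs : cs[i]? with
        | none => simp
        | some x =>
          obtain ⟨s, e, rfl, hlt⟩ := hget hcs
          simp only [Option.map_some]
          rw [pv_G_char c s e hlt]
          split_ifs with hh1 hh2 <;> simp <;> omega
      · rcases eq_or_ne c u with rfl | huc
        · rw [if_neg (Ne.symm hu1), if_pos rfl]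
          refine ⟨?_, fun i => ?_⟩
          · refine List.Nodup.append (h3 c).1 hnd_s ?_
            intro i hi1 hi2
            obtain ⟨e, hs⟩ := ((h3 c).2 i).mp hi1
            obtain ⟨e', hs'⟩ := (iff_s i).mp hi2
            rw [hs] at hs'
            simp at hs'
          · rw [List.mem_append, (h3 c).2 i, iff_s i, hmapget i]
            cases hcs : cs[i]? with
            | none => simp
            | some x =>
              obtain ⟨s, e, rfl, hlt⟩ := hget hcs
              simp only [Option.map_some]
              rw [pv_G_char c s e hlt]
              split_ifs with hh1 hh2 <;> simp <;> omega
        · rw [if_neg (Ne.symm hu1), if_neg (Ne.symm huc)]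
          refine ⟨(h3 u).1, fun i => ?_⟩
          rw [(h3 u).2 i, hmapget i]
          cases hcs : cs[i]? with
          | none => simp
          | some x =>
            obtain ⟨s, e, rfl, hlt⟩ := hget hcs
            simp only [Option.map_some]
            rw [pv_G_char c s e hlt]
            split_ifs with hh1 hh2 <;> simp <;> omega
    · -- coverage invariant
      intro x
      rw [Cv x]
      rcases eq_or_ne c x with rfl | hxc
      · rw [if_pos rfl]
        have hnn := (h4 c).1
        have l1 : (0 : Int) ≤ ((ends.getD c []).length : Int) := Int.natCast_nonneg _
        have l2 : (0 : Int) ≤ ((starts.getD (c + 1) []).length : Int) := Int.natCast_nonneg _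
        refine ⟨by omega, ?_, ?_⟩
        · intro _
          rcases hany.mp hAny with hx | hx | hx
          · obtain ⟨i, s, e, hi, hse⟩ := ((h4 c).2).mp hx
            refine ⟨i, ?_⟩
            rw [hmapget i, hi]
            simp only [Option.map_some]
            obtain ⟨s', e', heq, hlt⟩ := hget hi
            simp only [List.cons.injEq, and_true] at heq
            rw [pv_G_char c s e (by omega)]
            split_ifs with hh1 hh2
            · exact ⟨s, c + 1, rfl, by omega⟩
            · exact ⟨c, e, rfl, by omega⟩
            · exact ⟨s, e, rfl, hse.1, hse.2⟩
          · obtain ⟨i, hi⟩ := List.exists_mem_of_ne_nil _ hx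
            obtain ⟨s, hs⟩ := (iff_e i).mp hi
            obtain ⟨s', e', heq, hlt⟩ := hget hs
            simp only [List.cons.injEq, and_true] at heq
            refine ⟨i, s, c + 1, ?_, by omega, by omega⟩
            rw [hmapget i, hs]
            simp only [Option.map_some]
            rw [pv_G_char c s c (by omega)]
            simp
          · obtain ⟨i, hi⟩ := List.exists_mem_of_ne_nil _ hx
            obtain ⟨e, hs⟩ := (iff_s i).mp hi
            obtain ⟨s', e', heq, hlt⟩ := hget hs
            simp only [List.cons.injEq, and_true] at heq
            refine ⟨i, c, e, ?_, by omega, by omega⟩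
            rw [hmapget i, hs]
            simp only [Option.map_some]
            rw [pv_G_char c (c + 1) e (by omega), if_neg (by omega), if_pos rfl]
        · intro _
          rcases hany.mp hAny with hx | hx | hx
          · omega
          · have := List.length_pos_of_ne_nil hx
            omega
          · have := List.length_pos_of_ne_nil hx
            omega
      · rw [if_neg (Ne.symm hxc)]
        refine ⟨(h4 x).1, ?_⟩
        rw [(h4 x).2]
        constructor
        · rintro ⟨i, s, e, hi, hse⟩
          refine ⟨i, ?_⟩
          rw [hmapget i, hi]
          simp only [Option.map_some]
          obtain ⟨s', e', heq, hlt⟩ := hget hi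
          simp only [List.cons.injEq, and_true] at heq
          rw [pv_G_char c s e (by omega)]
          split_ifs with hh1 hh2
          · exact ⟨s, c + 1, rfl, hse.1, by omega⟩
          · exact ⟨c, e, rfl, by omega, hse.2⟩
          · exact ⟨s, e, rfl, hse⟩
        · rintro ⟨i, s, e, hi, hse⟩
          rw [hmapget i] at hi
          cases hcs : cs[i]? with
          | none => rw [hcs] at hi; simp at hi
          | some x' =>
            rw [hcs] at hi
            obtain ⟨s', e', rfl, hlt⟩ := hget hcs
            simp only [Option.map_some, Option.some.injEq] at hi
            rw [pv_G_char c s' e' hlt] at hi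
            split_ifs at hi with hh1 hh2 <;> simp at hi <;>
              exact ⟨i, s', e', hcs, by omega⟩
  · -- no candidate matched: B appends a fresh candidate, A appends too
    have hnone : ¬(0 < cov.getD c 0 ∨ ends.getD c [] ≠ [] ∨ starts.getD (c + 1) [] ≠ []) :=
      fun hh => hAny (hany.mpr hh)
    have hcov0 : ¬ 0 < cov.getD c 0 := fun h => hnone (Or.inl h)
    have hnil_e : ends.getD c [] = [] := by
      by_contra hh; exact hnone (Or.inr (Or.inl hh))
    have hnil_s : starts.getD (c + 1) [] = [] := by
      by_contra hh; exact hnone (Or.inr (Or.inr hh))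
    have hcond : decide (0 < cov.getD c 0) = false ∧ ends.getD c [] = [] ∧ starts.getD (c + 1) [] = [] :=
      ⟨decide_eq_false hcov0, hnil_e, hnil_s⟩
    have hr1e : r1 = (cs, ends.erase c, cov) := by rw [hr1, hnil_e, List.foldl_nil]
    have hr2e : r2 = (cs, starts.erase (c + 1), cov) := by rw [hr2, hnil_s, List.foldl_nil, hr1e]
    have hid : cs.map (pvG c) = cs := by
      apply List.ext_getElem?
      intro j
      rw [List.getElem?_map]
      cases hcs : cs[j]? with
      | none => rfl
      | some x =>
        obtain ⟨s, e, rfl, hlt⟩ := hget hcs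
        have hno : ¬((s ≤ c ∧ c < e) ∨ c = e ∨ c = s - 1) := by
          rw [← pv_match_char c s e]
          intro hm
          exact hAny (List.any_eq_true.mpr ⟨[s, e], List.mem_of_getElem? hcs, hm⟩)
        simp only [Option.map_some]
        rw [pv_G_char c s e hlt, if_neg (by omega), if_neg (by omega)]
    have hcs' : pvStepA cs c = cs ++ [[c, c + 1]] := by
      rw [pv_stepA_eq, if_neg hAny, hid]
    have happ : ∀ j : Nat, (cs ++ [[c, c + 1]])[j]? =
        if j < cs.length then cs[j]? else if j = cs.length then some [c, c + 1] else none := by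
      intro j
      by_cases hj : j < cs.length
      · rw [if_pos hj, List.getElem?_append_left hj]
      · rw [if_neg hj]
        rcases eq_or_ne j cs.length with rfl | hne
        · rw [if_pos rfl, List.getElem?_append_right (le_refl _)]
          simp
        · rw [if_neg hne, List.getElem?_append_right (by omega)]
          have h1' : (1 : Nat) ≤ j - cs.length := by omega
          rw [List.getElem?_eq_none (by simpa using h1')]
    refine ⟨(ends.erase c).insert (c + 1) ((ends.erase c).getD (c + 1) [] ++ [cs.length]),
      (starts.erase (c + 1)).insert c ((starts.erase (c + 1)).getD c [] ++ [cs.length]),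
      cov.insert c (cov.getD c 0 + 1), ?_, ?_⟩
    · rw [hB, if_pos hcond, hcs', hr1e, hr2e]
    rw [hcs']
    have hlen : ∀ {i : Nat} {x : List Int}, cs[i]? = some x → i < cs.length := by
      intro i x hx
      obtain ⟨hi, -⟩ := List.getElem?_eq_some_iff.mp hx
      exact hi
    refine ⟨?_, ?_, ?_, ?_⟩
    · -- shapes
      intro x hx
      rw [List.mem_append] at hx
      rcases hx with hx | hx
      · exact h1 x hx
      · simp at hx
        exact ⟨c, c + 1, hx, by omega⟩
    · -- ends invariant
      intro v
      have EvN : ((ends.erase c).insert (c + 1) ((ends.erase c).getD (c + 1) [] ++ [cs.length])).getD v [] =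
          if v = c then [] else if v = c + 1 then ends.getD (c + 1) [] ++ [cs.length] else ends.getD v [] := by
        rw [PySem.Dict.getD_insert]
        rcases eq_or_ne c v with rfl | hvc
        · rw [if_neg (by omega), if_pos rfl, pv_getD_erase, if_pos rfl]
        · rcases eq_or_ne (c + 1) v with rfl | hv1
          · rw [if_pos rfl, if_neg (Ne.symm hvc), if_pos rfl, pv_getD_erase, if_neg (by omega)]
          · rw [if_neg (Ne.symm hv1), if_neg (Ne.symm hvc), if_neg (Ne.symm hv1), pv_getD_erase,
              if_neg (Ne.symm hvc)]
      rw [EvN]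
      rcases eq_or_ne c v with rfl | hvc
      · rw [if_pos rfl]
        refine ⟨List.nodup_nil, fun i => ?_⟩
        rw [happ i]
        simp only [List.not_mem_nil, false_iff]
        rintro ⟨s, hs⟩
        split_ifs at hs with hh1 hh2
        · exact absurd ((iff_e i).mpr ⟨s, hs⟩) (by rw [hnil_e]; exact List.not_mem_nil)
        all_goals simp at hs
      · rcases eq_or_ne (c + 1) v with rfl | hv1
        · rw [if_neg (Ne.symm hvc), if_pos rfl]
          refine ⟨?_, fun i => ?_⟩
          · refine List.Nodup.append (h2 (c + 1)).1 (List.nodup_singleton _) ?_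
            intro i hi1 hi2
            obtain ⟨s, hs⟩ := ((h2 (c + 1)).2 i).mp hi1
            simp at hi2
            exact absurd (hlen hs) (by omega)
          · rw [List.mem_append, (h2 (c + 1)).2 i, happ i]
            simp only [List.mem_singleton]
            constructor
            · rintro (⟨s, hs⟩ | rfl)
              · exact ⟨s, by rw [if_pos (hlen hs)]; exact hs⟩
              · exact ⟨c, by rw [if_neg (by omega), if_pos rfl]⟩
            · rintro ⟨s, hs⟩
              split_ifs at hs with hh1 hh2
              · exact Or.inl ⟨s, hs⟩
              · exact Or.inr hh2
              all_goals simp at hs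
        · rw [if_neg (Ne.symm hvc), if_neg (Ne.symm hv1)]
          refine ⟨(h2 v).1, fun i => ?_⟩
          rw [(h2 v).2 i, happ i]
          constructor
          · rintro ⟨s, hs⟩
            exact ⟨s, by rw [if_pos (hlen hs)]; exact hs⟩
          · rintro ⟨s, hs⟩
            split_ifs at hs with hh1 hh2
            · exact ⟨s, hs⟩
            all_goals simp at hs
            all_goals omega
    · -- starts invariant
      intro u
      have SvN : ((starts.erase (c + 1)).insert c ((starts.erase (c + 1)).getD c [] ++ [cs.length])).getD u [] =
          if u = c + 1 then [] else if u = c then starts.getD c [] ++ [cs.length] else starts.getD u [] := by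
        rw [PySem.Dict.getD_insert]
        rcases eq_or_ne (c + 1) u with rfl | hu1
        · rw [if_neg (by omega), if_pos rfl, pv_getD_erase, if_pos rfl]
        · rcases eq_or_ne c u with rfl | huc
          · rw [if_pos rfl, if_neg (Ne.symm hu1), if_pos rfl, pv_getD_erase, if_neg (by omega)]
          · rw [if_neg (Ne.symm huc), if_neg (Ne.symm hu1), if_neg (Ne.symm huc), pv_getD_erase,
              if_neg (Ne.symm hu1)]
      rw [SvN]
      rcases eq_or_ne (c + 1) u with rfl | hu1
      · rw [if_pos rfl]
        refine ⟨List.nodup_nil, fun i => ?_⟩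
        rw [happ i]
        simp only [List.not_mem_nil, false_iff]
        rintro ⟨e, hs⟩
        split_ifs at hs with hh1 hh2
        · exact absurd ((iff_s i).mpr ⟨e, hs⟩) (by rw [hnil_s]; exact List.not_mem_nil)
        all_goals simp at hs
      · rcases eq_or_ne c u with rfl | huc
        · rw [if_neg (Ne.symm hu1), if_pos rfl]
          refine ⟨?_, fun i => ?_⟩
          · refine List.Nodup.append (h3 c).1 (List.nodup_singleton _) ?_
            intro i hi1 hi2
            obtain ⟨e, hs⟩ := ((h3 c).2 i).mp hi1
            simp at hi2
            exact absurd (hlen hs) (by omega)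
          · rw [List.mem_append, (h3 c).2 i, happ i]
            simp only [List.mem_singleton]
            constructor
            · rintro (⟨e, hs⟩ | rfl)
              · exact ⟨e, by rw [if_pos (hlen hs)]; exact hs⟩
              · exact ⟨c + 1, by rw [if_neg (by omega), if_pos rfl]⟩
            · rintro ⟨e, hs⟩
              split_ifs at hs with hh1 hh2
              · exact Or.inl ⟨e, hs⟩
              · exact Or.inr hh2
              all_goals simp at hs
        · rw [if_neg (Ne.symm hu1), if_neg (Ne.symm huc)]
          refine ⟨(h3 u).1, fun i => ?_⟩
          rw [(h3 u).2 i, happ i]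
          constructor
          · rintro ⟨e, hs⟩
            exact ⟨e, by rw [if_pos (hlen hs)]; exact hs⟩
          · rintro ⟨e, hs⟩
            split_ifs at hs with hh1 hh2
            · exact ⟨e, hs⟩
            all_goals simp at hs
            all_goals omega
    · -- coverage invariant
      intro x
      rw [PySem.Dict.getD_insert]
      rcases eq_or_ne c x with rfl | hxc
      · rw [if_pos rfl]
        have hnn := (h4 c).1
        refine ⟨by omega, ?_, fun _ => by omega⟩
        intro _
        refine ⟨cs.length, c, c + 1, ?_, le_refl _, by omega⟩
        rw [happ cs.length, if_neg (by omega), if_pos rfl]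
      · rw [if_neg (Ne.symm hxc)]
        refine ⟨(h4 x).1, ?_⟩
        rw [(h4 x).2]
        constructor
        · rintro ⟨i, s, e, hi, hse⟩
          refine ⟨i, s, e, ?_, hse⟩
          rw [happ i, if_pos (hlen hi)]
          exact hi
        · rintro ⟨i, s, e, hi, hse⟩
          rw [happ i] at hi
          split_ifs at hi with hh1 hh2
          · exact ⟨i, s, e, hi, hse⟩
          all_goals simp at hi
          all_goals omega

lemma pv_row_fold (c_row : List Int) : ∀ (cs : List (List Int)) (ends starts : PySem.Dict Int (List Nat)) (cov : PySem.Dict Int Int),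
    pvInv cs ends starts cov →
    ∃ e' s' v', c_row.foldl pvStepB (cs, ends, starts, cov) = (c_row.foldl pvStepA cs, e', s', v') ∧
      pvInv (c_row.foldl pvStepA cs) e' s' v' := by
  induction c_row with
  | nil => intro cs ends starts cov h; exact ⟨ends, starts, cov, rfl, h⟩
  | cons c tl ih =>
    intro cs ends starts cov h
    obtain ⟨e', s', v', heq, hinv⟩ := pv_stepB_spec c cs ends starts cov h
    obtain ⟨e'', s'', v'', heq2, hinv2⟩ := ih (pvStepA cs c) e' s' v' hinv
    exact ⟨e'', s'', v'', by simpa [List.foldl_cons, heq] using heq2, hinv2⟩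

lemma pv_outer_fold (al : List (List Int)) (l : List Int) :
    ∀ (cs : List (List Int)) (ends starts : PySem.Dict Int (List Nat)) (cov : PySem.Dict Int Int),
    pvInv cs ends starts cov →
    ∃ e' s' v', l.foldl
      (fun st idx =>
        match PySem.List.pyGet? al idx with
        | some orig_corrs => orig_corrs.foldl pvStepB st
        | none => st)
      (cs, ends, starts, cov)
      = (l.foldl
          (fun cands idx =>
            match PySem.List.pyGet? al idx with
            | some orig_corrs => orig_corrs.foldl pvStepA cands
            | none => cands) cs, e', s', v') ∧
        pvInv (l.foldl
          (fun cands idx =>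
            match PySem.List.pyGet? al idx with
            | some orig_corrs => orig_corrs.foldl pvStepA cands
            | none => cands) cs) e' s' v' := by
  induction l with
  | nil => intro cs ends starts cov h; exact ⟨ends, starts, cov, rfl, h⟩
  | cons idx tl ih =>
    intro cs ends starts cov h
    cases hg : PySem.List.pyGet? al idx with
    | none =>
      obtain ⟨e', s', v', heq, hinv⟩ := ih cs ends starts cov h
      exact ⟨e', s', v', by simpa [List.foldl_cons, hg] using heq, by simpa [List.foldl_cons, hg] using hinv⟩
    | some row =>
      obtain ⟨e', s', v', heq, hinv⟩ := pv_row_fold row cs ends starts cov h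
      obtain ⟨e'', s'', v'', heq2, hinv2⟩ := ih _ e' s' v' hinv
      exact ⟨e'', s'', v'', by simpa [List.foldl_cons, hg, heq] using heq2, by simpa [List.foldl_cons, hg] using hinv2⟩

lemma pv_init_inv : pvInv [] PySem.Dict.empty PySem.Dict.empty PySem.Dict.empty := by
  refine ⟨by simp, ?_, ?_, ?_⟩ <;> intro v <;> simp [PySem.Dict.getD_empty]

-- ===== VERDICT (by name: the statement is the Claim_ definition above) =====
theorem generate_entity_candidates_from_alignments_spec : Claim_equal_generate_entity_candidates_from_alignments := by
  intro start_idx end_idx al _hdom _hpre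
  unfold Spec_generate_entity_candidates_from_alignments
  unfold generate_entity_candidates_from_alignments generate_entity_candidates_from_alignments_alt
  obtain ⟨e', s', v', heq, _⟩ := pv_outer_fold al (PySem.List.pyRange start_idx end_idx 1)
    [] PySem.Dict.empty PySem.Dict.empty PySem.Dict.empty pv_init_inv
  rw [heq]
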